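-- pv_equiv track=rewrite | github.com/steph-cs/DSOO | MVC/entidade/abstract_aposta_sorteio.py | num_rep
-- ===== SOURCE A (Python) =====
-- def num_rep(numeros: list):
--     rep = False
--     cont = 0
--     while rep is False and cont< len(numeros):
--         if (numeros.count(numeros[cont]) > 1) or numeros[cont] <= 0 or numeros[cont]>15:
--             rep = True
--         else:
--             cont += 1
--     return rep
-- ===== SOURCE B (Python) =====
-- def num_rep(numeros: list):
--     return len(set(numeros)) != len(numeros) or any(n <= 0 or n > 15 for n in numeros)
-- ===== Notes on version B (the rewrite author's own statement) =====
-- stated objective: simpler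
-- what changed: Replaced A's index-counter while loop with per-element .count calls by one set-length comparison for duplicates plus one any() scan for range violations.
import Mathlib
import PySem

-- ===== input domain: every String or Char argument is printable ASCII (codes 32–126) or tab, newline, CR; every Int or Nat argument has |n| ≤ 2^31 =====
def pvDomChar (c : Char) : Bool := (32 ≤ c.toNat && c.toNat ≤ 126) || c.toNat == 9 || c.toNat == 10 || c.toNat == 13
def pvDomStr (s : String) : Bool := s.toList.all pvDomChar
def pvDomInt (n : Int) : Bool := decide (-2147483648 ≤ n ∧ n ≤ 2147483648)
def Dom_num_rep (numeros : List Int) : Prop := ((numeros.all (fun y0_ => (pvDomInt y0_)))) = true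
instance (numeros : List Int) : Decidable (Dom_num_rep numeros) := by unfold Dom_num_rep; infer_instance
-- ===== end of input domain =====

-- B replaces A's index-counter loop with per-element .count calls by a set-length
-- comparison for duplicates plus a single any() range scan (objective: simpler).

-- ===== PORT A =====
-- the while loop: rep stays False until the condition fires; cont advances otherwise
def numRepLoop (numeros : List Int) (cont : Nat) : Bool :=
  if h : cont < numeros.length then
    if numeros.count numeros[cont] > 1 ∨ numeros[cont] ≤ 0 ∨ numeros[cont] > 15 then
      true
    else
      numRepLoop numeros (cont + 1)
  else
    false
termination_by numeros.length - cont

def num_rep (numeros : List Int) : Bool := numRepLoop numeros 0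

-- ===== PORT B =====
def num_rep_alt (numeros : List Int) : Bool :=
  decide ((PySem.Set.ofList numeros).length ≠ numeros.length)
    || numeros.any (fun n => decide (n ≤ 0) || decide (n > 15))

-- ===== PRECONDITION & SPEC =====
def Spec_num_rep (numeros : List Int) (out : Bool) : Prop := out = num_rep_alt numeros
instance (numeros : List Int) (out : Bool) : Decidable (Spec_num_rep numeros out) := by unfold Spec_num_rep; infer_instance

-- ===== CLAIM (what is proved, stated in full; the proofs are below) =====
def Claim_equal_num_rep : Prop := ∀ (numeros : List Int), Dom_num_rep numeros → Spec_num_rep numeros (num_rep numeros)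

-- ===== LEMMAS AND PROOFS =====

-- A's loop from index `cont` scans the suffix `numeros.drop cont`
theorem numRepLoop_eq_any (numeros : List Int) (cont : Nat) :
    numRepLoop numeros cont =
      (numeros.drop cont).any
        (fun x => decide (numeros.count x > 1) || decide (x ≤ 0) || decide (x > 15)) := by
  by_cases h : cont < numeros.length
  · rw [numRepLoop, dif_pos h, List.drop_eq_getElem_cons h, List.any_cons]
    by_cases hc : numeros.count numeros[cont] > 1 ∨ numeros[cont] ≤ 0 ∨ numeros[cont] > 15
    · rw [if_pos hc]
      rcases hc with hc | hc | hc <;> simp [hc]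
    · rw [if_neg hc]
      rw [not_or, not_or] at hc
      obtain ⟨h1, h2, h3⟩ := hc
      have hf : (decide (numeros.count numeros[cont] > 1) || decide (numeros[cont] ≤ 0)
          || decide (numeros[cont] > 15)) = false := by
        simp only [Bool.or_eq_false_iff, decide_eq_false_iff_not]
        exact ⟨⟨by omega, by omega⟩, by omega⟩
      rw [numRepLoop_eq_any numeros (cont + 1), hf, Bool.false_or]
  · rw [numRepLoop, dif_neg h, List.drop_eq_nil_of_le (Nat.le_of_not_lt h)]
    rfl
termination_by numeros.length - cont

theorem ofList_length_eq_iff (xs : List Int) :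
    (PySem.Set.ofList xs).length = xs.length ↔ xs.Nodup := by
  constructor
  · intro h
    have hfin : (PySem.Set.ofList xs).toFinset = xs.toFinset := by
      ext a; simp [List.mem_toFinset, PySem.Set.mem_ofList]
    have hcard : xs.toFinset.card = xs.length := by
      rw [← hfin, List.toFinset_card_of_nodup (PySem.Set.nodup_ofList xs), h]
    exact Multiset.toFinset_card_eq_card_iff_nodup.mp hcard
  · intro h
    rw [PySem.Set.ofList_eq_self_of_nodup xs h]

theorem dup_iff_count (xs : List Int) :
    (∃ x ∈ xs, xs.count x > 1) ↔ ¬ xs.Nodup := by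
  rw [List.nodup_iff_count_le_one]
  rw [not_forall]
  constructor
  · rintro ⟨x, _, hx⟩; exact ⟨x, by omega⟩
  · rintro ⟨x, hx⟩
    have hx' : 1 < List.count x xs := by omega
    exact ⟨x, List.count_pos_iff.mp (by omega), hx'⟩

-- ===== VERDICT (by name: the statement is the Claim_ definition above) =====
theorem num_rep_spec : Claim_equal_num_rep := by
  intro numeros _
  unfold Spec_num_rep num_rep num_rep_alt
  rw [numRepLoop_eq_any, List.drop_zero]
  rw [Bool.eq_iff_iff]
  simp only [List.any_eq_true, Bool.or_eq_true, decide_eq_true_eq, ne_eq]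
  constructor
  · rintro ⟨x, hm, (hc | hr) | hr⟩
    · exact Or.inl (fun h => (dup_iff_count numeros).mp ⟨x, hm, hc⟩ ((ofList_length_eq_iff numeros).mp h))
    · exact Or.inr ⟨x, hm, Or.inl hr⟩
    · exact Or.inr ⟨x, hm, Or.inr hr⟩
  · rintro (h | ⟨x, hm, hr | hr⟩)
    · have hnd : ¬ numeros.Nodup := fun hn => h ((ofList_length_eq_iff numeros).mpr hn)
      obtain ⟨x, hm, hc⟩ := (dup_iff_count numeros).mpr hnd
      exact ⟨x, hm, Or.inl (Or.inl hc)⟩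
    · exact ⟨x, hm, Or.inl (Or.inr hr)⟩
    · exact ⟨x, hm, Or.inr hr⟩
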